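-- pv_equiv track=rewrite | github.com/siefkenj/nautilus-combine-videos | combine.videos.python.py | get_streams
-- ===== SOURCE A (Python) =====
-- def get_streams(lst):
--     """ return the first video and audio streams in the file """
--     video,audio = {},{}
--     for s in reversed(lst):
--         if s.get('codec_type', False) == 'video':
--             video = s
--         if s.get('codec_type', False) == 'audio':
--             audio = s
--     return (video, audio)
-- ===== SOURCE B (Python) =====
-- def get_streams(lst):
--     """ return the first video and audio streams in the file """
--     video = next((s for s in lst if s.get('codec_type', False) == 'video'), {})
--     audio = next((s for s in lst if s.get('codec_type', False) == 'audio'), {})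
--     return (video, audio)
-- ===== Notes on version B (the rewrite author's own statement) =====
-- stated objective: idiomatic
-- what changed: Replaced the single reverse loop with state overwriting by two independent forward short-circuit searches (next over a generator) per codec_type.
import Mathlib
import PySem

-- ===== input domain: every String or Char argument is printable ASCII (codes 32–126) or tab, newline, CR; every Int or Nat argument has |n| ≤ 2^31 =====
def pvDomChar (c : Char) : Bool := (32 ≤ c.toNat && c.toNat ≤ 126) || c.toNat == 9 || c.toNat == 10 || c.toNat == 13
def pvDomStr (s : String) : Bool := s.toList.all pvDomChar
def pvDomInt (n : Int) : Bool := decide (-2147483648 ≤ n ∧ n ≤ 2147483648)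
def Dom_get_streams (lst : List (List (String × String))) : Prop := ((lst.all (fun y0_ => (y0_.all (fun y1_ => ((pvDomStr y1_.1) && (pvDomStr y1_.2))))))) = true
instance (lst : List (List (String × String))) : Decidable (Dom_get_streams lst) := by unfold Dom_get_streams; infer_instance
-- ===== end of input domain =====

-- B replaces A's reverse loop with overwriting state by two independent forward
-- short-circuit searches (idiomatic; same cost).

-- ===== PORT A =====
-- s.get('codec_type', False) == 'video' : a missing key yields False, which is ≠ 'video';
-- assoc-list lookup is first match (Python dict keys are unique, so exact).
def pvDictGet (s : List (String × String)) (k : String) : Option String :=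
  (s.find? (fun p => p.1 == k)).map (·.2)

def get_streams (lst : List (List (String × String))) : (List (String × String)) × (List (String × String)) :=
  lst.reverse.foldl
    (fun (va : (List (String × String)) × (List (String × String))) s =>
      let va := if pvDictGet s "codec_type" == some "video" then (s, va.2) else va
      if pvDictGet s "codec_type" == some "audio" then (va.1, s) else va)
    ([], [])

-- ===== PORT B =====
def get_streams_alt (lst : List (List (String × String))) : (List (String × String)) × (List (String × String)) :=
  ((lst.find? (fun s => pvDictGet s "codec_type" == some "video")).getD [],
   (lst.find? (fun s => pvDictGet s "codec_type" == some "audio")).getD [])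

-- ===== PRECONDITION & SPEC =====
def Spec_get_streams (lst : List (List (String × String))) (out : (List (String × String)) × (List (String × String))) : Prop := out = get_streams_alt lst
instance (lst : List (List (String × String))) (out : (List (String × String)) × (List (String × String))) : Decidable (Spec_get_streams lst out) := by unfold Spec_get_streams; infer_instance

-- ===== CLAIM (what is proved, stated in full; the proofs are below) =====
def Claim_equal_get_streams : Prop := ∀ (lst : List (List (String × String))), Dom_get_streams lst → Spec_get_streams lst (get_streams lst)

-- ===== LEMMAS AND PROOFS =====
lemma get_streams_foldr (lst : List (List (String × String))) :
    get_streams lst =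
      lst.foldr
        (fun s va =>
          let va := if pvDictGet s "codec_type" == some "video" then (s, va.2) else va
          if pvDictGet s "codec_type" == some "audio" then (va.1, s) else va)
        ([], []) := by
  simp [get_streams, List.foldl_reverse]

lemma get_streams_eq_alt (lst : List (List (String × String))) :
    get_streams lst = get_streams_alt lst := by
  rw [get_streams_foldr]
  induction lst with
  | nil => simp [get_streams_alt]
  | cons s rest ih =>
    simp only [List.foldr_cons, ih, get_streams_alt, List.find?_cons]
    by_cases hv : pvDictGet s "codec_type" == some "video" <;>
      by_cases ha : pvDictGet s "codec_type" == some "audio" <;>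
        simp [hv, ha]

-- ===== VERDICT (by name: the statement is the Claim_ definition above) =====
theorem get_streams_spec : Claim_equal_get_streams := by
  intro lst _
  exact get_streams_eq_alt lst
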